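-- pv_equiv track=rewrite | github.com/Gouderg/advent-of-code | 2020/day14/day14.py | allPossibilities
-- ===== SOURCE A (Python) =====
-- def allPossibilities(value, offset):
--     somme = ''
--     if value.isnumeric():
--         return value
--
--     for i in range(offset, len(value)):
--         if value[i] == 'X':
--             newValue = value[:i]+'0'+value[i+1:]
--             somme+=' '+allPossibilities(newValue, i+1)
--             newValue = value[:i]+'1'+value[i+1:]
--             somme+=' '+allPossibilities(newValue, i+1)
--     return somme
-- ===== SOURCE B (Python) =====
-- def _children(v, off):
--     ch = []
--     for i in range(off, len(v)):
--         if v[i] == 'X':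
--             ch.append((v[:i] + '0' + v[i + 1:], i + 1))
--             ch.append((v[:i] + '1' + v[i + 1:], i + 1))
--     return ch
--
--
-- def allPossibilities(value, offset):
--     # Iterative explicit-stack preorder traversal instead of A's recursion.
--     if value.isnumeric():
--         return value
--     out = []
--     stack = _children(value, offset)[::-1]
--     while stack:
--         v, off = stack.pop()
--         out.append(' ')
--         if v.isnumeric():
--             out.append(v)
--         else:
--             stack.extend(reversed(_children(v, off)))
--     return ''.join(out)
-- ===== Notes on version B (the rewrite author's own statement) =====
-- stated objective: alternative
-- what changed: A's direct recursion (building the result by string concatenation inside nested recursive calls) is replaced by an iterative explicit-stack preorder traversal: the non-numeric root's children are pushed, each popped item contributes a space and either its numeric value or its children, and the pieces are joined once at the end.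
import Mathlib
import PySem

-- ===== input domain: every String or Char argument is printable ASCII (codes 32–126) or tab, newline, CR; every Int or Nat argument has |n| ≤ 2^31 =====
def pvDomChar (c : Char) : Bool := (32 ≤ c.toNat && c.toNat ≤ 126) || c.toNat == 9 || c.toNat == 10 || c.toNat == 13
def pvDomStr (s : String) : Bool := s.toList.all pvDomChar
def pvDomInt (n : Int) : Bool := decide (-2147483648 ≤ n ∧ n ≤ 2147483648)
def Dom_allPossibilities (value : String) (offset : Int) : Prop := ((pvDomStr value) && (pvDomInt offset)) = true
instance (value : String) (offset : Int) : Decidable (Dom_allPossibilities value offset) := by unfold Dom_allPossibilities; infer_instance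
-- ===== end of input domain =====

-- B replaces A's direct recursion by an iterative explicit-stack preorder traversal that joins
-- the collected pieces once at the end (objective: alternative decomposition, same output).

-- ===== PORT A =====
-- value[:i] + c + value[i+1:], the substituted string both Pythons build
def pvSub (v : List Char) (i : Int) (c : Char) : List Char :=
  PySem.List.slice v none (some i) ++ [c] ++ PySem.List.slice v (some (i+1)) none

-- recursion-depth budget (a strict upper bound on the call depth; not part of A's algorithm,
-- only the totality guard for the fuel below — proved sufficient in pvMeasDec/apAF_stable)
def pvMeas (v : List Char) (o : Int) : Nat :=
  if 0 ≤ o then ((v.length : Int) - o).toNat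
  else 2 ^ (-o).toNat * (v.length + 1) + (-o).toNat

-- A is recursive; the recursion is made total by a fuel argument.  The
-- `for i in range(offset, len(value))` loop with `somme += …` is the foldl over
-- PySem.List.pyRange.  `value.isnumeric()` is ported as PySem.Chars.strIsdigit: on the
-- printable-ASCII input domain Dom_, str.isnumeric() coincides exactly with the all-digits
-- test (the characters for which they differ are non-ASCII).  `value[i] == 'X'` raises
-- IndexError when i is out of range; there the port's test is simply false — exactly those
-- inputs are excluded by Pre_ below.
def apAF : Nat → List Char → Int → List Char
  | 0, _, _ => []   -- fuel exhausted: never reached from allPossibilities (the budget suffices)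
  | n+1, value, offset =>
    if PySem.Chars.strIsdigit value then value
    else
      (PySem.List.pyRange offset value.length 1).foldl
        (fun somme i =>
          if PySem.List.pyGet? value i = some 'X' then
            somme ++ [' '] ++ apAF n (pvSub value i '0') (i+1)
              ++ [' '] ++ apAF n (pvSub value i '1') (i+1)
          else somme) []

def allPossibilities (value : String) (offset : Int) : String :=
  String.ofList (apAF (pvMeas value.toList offset + 1) value.toList offset)

-- ===== PORT B =====
-- Port of Source B.  _children's `for i in range(off, len(v))` loop is the foldl pvChildren.
-- The Python stack keeps its top at the END of the list (and is seeded with the reversed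
-- children list); here the stack is the list with its top at the HEAD, so `stack.pop()` is
-- head-matching, the initial `_children(value, offset)[::-1]` is pvChildren unreversed, and
-- `stack.extend(reversed(_children(v, off)))` is `pvChildren v off ++ rest`.
-- `''.join(out)` is PySem.Chars.join []; `.isnumeric()` is strIsdigit as in port A (exact on
-- the ASCII domain).  The while loop is made total by a fuel argument bounding the number of
-- pops (pvBnd, a node count of the call tree — only the totality guard, proved sufficient in
-- the lemmas below).
def pvChildren (v : List Char) (off : Int) : List (List Char × Int) :=
  (PySem.List.pyRange off v.length 1).foldl
    (fun ch i =>
      if PySem.List.pyGet? v i = some 'X' then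
        ch ++ [(pvSub v i '0', i+1), (pvSub v i '1', i+1)]
      else ch) []

-- pop budget for apRunF (node count of the call tree, fuelled like apAF; not part of B's algorithm)
def pvBnd : Nat → List Char → Int → Nat
  | 0, _, _ => 1
  | n+1, v, o =>
    if PySem.Chars.strIsdigit v then 1
    else
      1 + (PySem.List.pyRange o v.length 1).foldl
        (fun s i =>
          if PySem.List.pyGet? v i = some 'X' then
            s + pvBnd n (pvSub v i '0') (i+1) + pvBnd n (pvSub v i '1') (i+1)
          else s) 0

def apRunF : Nat → List (List Char × Int) → List (List Char) → List Char
  | _, [], out => PySem.Chars.join [] out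
  | 0, _ :: _, out => PySem.Chars.join [] out   -- fuel exhausted: never reached from allPossibilities_alt
  | fuel+1, (v, off) :: rest, out =>
    let out2 := out ++ [[' ']]
    if PySem.Chars.strIsdigit v then apRunF fuel rest (out2 ++ [v])
    else apRunF fuel (pvChildren v off ++ rest) out2

def allPossibilities_alt (value : String) (offset : Int) : String :=
  if PySem.Str.strIsdigit value then value
  else
    String.ofList (apRunF (pvBnd (pvMeas value.toList offset + 1) value.toList offset)
      (pvChildren value.toList offset) [])

-- ===== PRECONDITION & SPEC =====
-- Pre_ excludes exactly the inputs on which Python A raises IndexError: a non-numeric value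
-- with offset < -len(value) (the first loop iteration then evaluates value[offset] out of
-- range).  On the printable-ASCII domain Dom_, value.isnumeric() is exactly the all-digits
-- test strIsdigit.  Python B raises IndexError on exactly the same inputs, so no input on
-- which A returns is excluded.
def Pre_allPossibilities (value : String) (offset : Int) : Prop :=
  PySem.Str.strIsdigit value = true ∨ -(PySem.Str.len value) ≤ offset
instance (value : String) (offset : Int) : Decidable (Pre_allPossibilities value offset) := by unfold Pre_allPossibilities; infer_instance

def pvWitness_allPossibilities : String × Int := ("1X0X", 0)

def Spec_allPossibilities (value : String) (offset : Int) (out : String) : Prop := out = allPossibilities_alt value offset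
instance (value : String) (offset : Int) (out : String) : Decidable (Spec_allPossibilities value offset out) := by unfold Spec_allPossibilities; infer_instance

-- ===== CLAIM (what is proved, stated in full; the proofs are below) =====
def Claim_equal_allPossibilities : Prop := ∀ (value : String) (offset : Int), Dom_allPossibilities value offset → Pre_allPossibilities value offset → Spec_allPossibilities value offset (allPossibilities value offset)

-- ===== LEMMAS AND PROOFS =====

theorem joinNilFlatten (out : List (List Char)) : PySem.Chars.join [] out = out.flatten := by
  show List.intercalate [] out = out.flatten
  unfold List.intercalate
  induction out with
  | nil => simp
  | cons h t ih =>
    cases t with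
    | nil => simp
    | cons h2 t2 => simp_all [List.intersperse]

theorem pvInRange (v : List Char) (i : Int) (c : Char)
    (hg : PySem.List.pyGet? v i = some c) : PySem.Raise.InRange v.length i := by
  by_contra hc
  rw [← PySem.List.pyGet?_eq_none_iff] at hc
  simp [hc] at hg

theorem pvSub_length (v : List Char) (i : Int) (c : Char)
    (hin : PySem.Raise.InRange v.length i) :
    (pvSub v i c).length = if i = -1 then 2 * v.length else v.length := by
  obtain ⟨h1, h2⟩ := hin
  unfold pvSub
  by_cases h0 : 0 ≤ i
  · rw [if_neg (by omega), PySem.List.slice_to v h0, PySem.List.slice_from v (by omega)]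
    simp only [List.length_append, List.length_take, List.length_drop, List.length_cons,
      List.length_nil]
    omega
  · have hk : i = -(((-i).toNat : Nat) : Int) := by omega
    by_cases h1' : i = -1
    · rw [if_pos h1']
      rw [hk, PySem.List.slice_to_neg_natCast v _ (by omega)]
      rw [show (-(((-i).toNat : Nat) : Int)) + 1 = (0 : Int) by omega,
        PySem.List.slice_from v (by omega)]
      simp only [List.length_append, List.length_take, List.length_drop, List.length_cons,
        List.length_nil, Int.toNat_zero]
      omega
    · rw [if_neg h1']
      rw [hk, PySem.List.slice_to_neg_natCast v _ (by omega)]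
      rw [show (-(((-i).toNat : Nat) : Int)) + 1 = -((((-i).toNat - 1 : Nat)) : Int) by omega,
        PySem.List.slice_from_neg_natCast v _ (by omega)]
      simp only [List.length_append, List.length_take, List.length_drop, List.length_cons,
        List.length_nil]
      omega

theorem pvMeasDec (v : List Char) (o i : Int) (c : Char)
    (ho : o ≤ i) (hin : PySem.Raise.InRange v.length i) :
    pvMeas (pvSub v i c) (i+1) < pvMeas v o := by
  have hlen := pvSub_length v i c hin
  obtain ⟨h1, h2⟩ := hin
  unfold pvMeas
  by_cases h0 : 0 ≤ o
  · rw [if_pos (by omega : (0:Int) ≤ i+1), if_pos h0, if_neg (by omega : ¬ i = -1)] at *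
    rw [hlen]
    omega
  · rw [if_neg h0]
    have ha : 1 ≤ (-o).toNat := by omega
    by_cases hi0 : 0 ≤ i + 1
    · rw [if_pos hi0]
      have hp : 2 * (v.length + 1) ≤ 2 ^ (-o).toNat * (v.length + 1) :=
        Nat.mul_le_mul_right _ (by calc 2 = 2^1 := rfl
                                     _ ≤ 2 ^ (-o).toNat := Nat.pow_le_pow_right (by norm_num) ha)
      by_cases h1' : i = -1
      · rw [if_pos h1'] at hlen
        rw [hlen]
        omega
      · rw [if_neg h1'] at hlen
        rw [hlen]
        omega
    · rw [if_neg hi0]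
      rw [if_neg (by omega : ¬ i = -1)] at hlen
      rw [hlen]
      have hb : (-(i+1)).toNat + 1 ≤ (-o).toNat := by omega
      have m1 : 2 ^ (-(i+1)).toNat * (v.length+1) ≤ 2 ^ ((-o).toNat - 1) * (v.length+1) :=
        Nat.mul_le_mul_right _ (Nat.pow_le_pow_right (by norm_num) (by omega))
      have m2 : 2 ^ ((-o).toNat - 1) * (v.length+1) + 2 ^ ((-o).toNat - 1) * (v.length+1)
          = 2 ^ (-o).toNat * (v.length+1) := by
        rw [← Nat.two_mul, ← Nat.mul_assoc, ← Nat.pow_succ']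
        congr 2
        omega
      have m3 : 1 ≤ 2 ^ ((-o).toNat - 1) * (v.length+1) :=
        Nat.one_le_iff_ne_zero.mpr (by positivity)
      omega

theorem apAF_stable : ∀ (n : Nat) (v : List Char) (o : Int), pvMeas v o < n →
    apAF n v o = apAF (pvMeas v o + 1) v o := by
  intro n
  induction n using Nat.strong_induction_on with
  | _ n IH =>
    intro v o h
    cases n with
    | zero => omega
    | succ n' =>
      simp only [apAF]
      by_cases hd : PySem.Chars.strIsdigit v = true
      · simp [hd]
      · simp only [hd, Bool.false_eq_true, if_false]
        apply PySem.List.foldl_congr_mem'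
        intro i hi acc
        have hio := PySem.List.mem_pyRange_one.mp hi
        by_cases hX : PySem.List.pyGet? v i = some 'X'
        · have hin := pvInRange v i 'X' hX
          have d0 := pvMeasDec v o i '0' hio.1 hin
          have d1 := pvMeasDec v o i '1' hio.1 hin
          rw [if_pos hX, if_pos hX,
            IH n' (by omega) _ _ (by omega), IH n' (by omega) _ _ (by omega),
            IH (pvMeas v o) (by omega) _ _ d0, IH (pvMeas v o) (by omega) _ _ d1]
        · rw [if_neg hX, if_neg hX]

theorem pvBnd_stable : ∀ (n : Nat) (v : List Char) (o : Int), pvMeas v o < n →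
    pvBnd n v o = pvBnd (pvMeas v o + 1) v o := by
  intro n
  induction n using Nat.strong_induction_on with
  | _ n IH =>
    intro v o h
    cases n with
    | zero => omega
    | succ n' =>
      simp only [pvBnd]
      by_cases hd : PySem.Chars.strIsdigit v = true
      · simp [hd]
      · simp only [hd, Bool.false_eq_true, if_false]
        congr 1
        apply PySem.List.foldl_congr_mem'
        intro i hi acc
        have hio := PySem.List.mem_pyRange_one.mp hi
        by_cases hX : PySem.List.pyGet? v i = some 'X'
        · have hin := pvInRange v i 'X' hX
          have d0 := pvMeasDec v o i '0' hio.1 hin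
          have d1 := pvMeasDec v o i '1' hio.1 hin
          rw [if_pos hX, if_pos hX,
            IH n' (by omega) _ _ (by omega), IH n' (by omega) _ _ (by omega),
            IH (pvMeas v o) (by omega) _ _ d0, IH (pvMeas v o) (by omega) _ _ d1]
        · rw [if_neg hX, if_neg hX]

theorem pvBnd_pos (n : Nat) (v : List Char) (o : Int) : 1 ≤ pvBnd n v o := by
  cases n with
  | zero => simp [pvBnd]
  | succ n' =>
    simp only [pvBnd]
    split
    · omega
    · omega

-- the X positions A's loop fires on
def pvXs (v : List Char) (o : Int) : List Int :=
  (PySem.List.pyRange o v.length 1).filter (fun i => decide (PySem.List.pyGet? v i = some 'X'))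

-- what one stack item of B contributes to the final output, expressed through port A
def itemOut (t : List Char × Int) : List Char := ' ' :: apAF (pvMeas t.1 t.2 + 1) t.1 t.2

def bndOf (t : List Char × Int) : Nat := pvBnd (pvMeas t.1 t.2 + 1) t.1 t.2

theorem pvChildren_eq (v : List Char) (o : Int) :
    pvChildren v o
      = (pvXs v o).flatMap (fun i => [(pvSub v i '0', i+1), (pvSub v i '1', i+1)]) := by
  unfold pvChildren pvXs
  rw [PySem.List.foldl_ite_eq_foldl_filter
    (p := fun i => PySem.List.pyGet? v i = some 'X')
    (f := fun ch i => ch ++ [(pvSub v i '0', i+1), (pvSub v i '1', i+1)]),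
    PySem.List.foldl_append_eq_flatMap]
  simp

theorem flatMap_pair {α β : Type} (l : List α) (p q : α → β) (f : β → List Char) :
    (l.flatMap (fun i => [p i, q i])).flatMap f = l.flatMap (fun i => f (p i) ++ f (q i)) := by
  induction l with
  | nil => simp
  | cons x xs ih => simp [ih]

theorem map_sum_pair {α β : Type} (l : List α) (p q : α → β) (f : β → Nat) :
    ((l.flatMap (fun i => [p i, q i])).map f).sum = (l.map (fun i => f (p i) + f (q i))).sum := by
  induction l with
  | nil => simp
  | cons x xs ih => simp [ih]; omega

theorem apAF_canon (v : List Char) (o : Int) (hd : PySem.Chars.strIsdigit v = false) :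
    apAF (pvMeas v o + 1) v o = (pvChildren v o).flatMap itemOut := by
  conv_lhs => rw [apAF]
  rw [if_neg (by simp [hd])]
  rw [PySem.List.foldl_congr_mem'
    (g := fun somme i =>
      if PySem.List.pyGet? v i = some 'X' then
        somme ++ (itemOut (pvSub v i '0', i+1) ++ itemOut (pvSub v i '1', i+1))
      else somme)]
  · rw [PySem.List.foldl_ite_eq_foldl_filter
      (p := fun i => PySem.List.pyGet? v i = some 'X')
      (f := fun somme i => somme ++ (itemOut (pvSub v i '0', i+1) ++ itemOut (pvSub v i '1', i+1))),
      PySem.List.foldl_append_eq_flatMap]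
    rw [pvChildren_eq, flatMap_pair]
    simp [pvXs]
  · intro i hi acc
    have hio := PySem.List.mem_pyRange_one.mp hi
    by_cases hX : PySem.List.pyGet? v i = some 'X'
    · have hin := pvInRange v i 'X' hX
      rw [if_pos hX, if_pos hX,
        apAF_stable (pvMeas v o) _ _ (pvMeasDec v o i '0' hio.1 hin),
        apAF_stable (pvMeas v o) _ _ (pvMeasDec v o i '1' hio.1 hin)]
      simp [itemOut, List.append_assoc]
    · rw [if_neg hX, if_neg hX]

theorem pvBnd_canon (v : List Char) (o : Int) (hd : PySem.Chars.strIsdigit v = false) :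
    pvBnd (pvMeas v o + 1) v o = 1 + ((pvChildren v o).map bndOf).sum := by
  conv_lhs => rw [pvBnd]
  rw [if_neg (by simp [hd])]
  congr 1
  rw [PySem.List.foldl_congr_mem'
    (g := fun s i =>
      if PySem.List.pyGet? v i = some 'X' then
        s + (bndOf (pvSub v i '0', i+1) + bndOf (pvSub v i '1', i+1))
      else s)]
  · rw [PySem.List.foldl_ite_eq_foldl_filter
      (p := fun i => PySem.List.pyGet? v i = some 'X')
      (f := fun s i => s + (bndOf (pvSub v i '0', i+1) + bndOf (pvSub v i '1', i+1))),
      PySem.List.foldl_add_nat]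
    rw [pvChildren_eq, map_sum_pair]
    simp [pvXs]
  · intro i hi acc
    have hio := PySem.List.mem_pyRange_one.mp hi
    by_cases hX : PySem.List.pyGet? v i = some 'X'
    · have hin := pvInRange v i 'X' hX
      rw [if_pos hX, if_pos hX,
        pvBnd_stable (pvMeas v o) _ _ (pvMeasDec v o i '0' hio.1 hin),
        pvBnd_stable (pvMeas v o) _ _ (pvMeasDec v o i '1' hio.1 hin)]
      simp [bndOf]
      omega
    · rw [if_neg hX, if_neg hX]

theorem apRunF_eq : ∀ (F : Nat) (stack : List (List Char × Int)) (out : List (List Char)),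
    (stack.map bndOf).sum ≤ F →
    apRunF F stack out = out.flatten ++ stack.flatMap itemOut := by
  intro F
  induction F with
  | zero =>
    intro stack out h
    cases stack with
    | nil => simp [apRunF, joinNilFlatten]
    | cons t rest =>
      exfalso
      have := pvBnd_pos (pvMeas t.1 t.2 + 1) t.1 t.2
      simp only [List.map_cons, List.sum_cons] at h
      unfold bndOf at h
      omega
  | succ F IH =>
    intro stack out h
    cases stack with
    | nil => simp [apRunF, joinNilFlatten]
    | cons t rest =>
      obtain ⟨v, off⟩ := t
      simp only [List.map_cons, List.sum_cons] at h
      have hpos : 1 ≤ bndOf (v, off) := pvBnd_pos _ _ _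
      simp only [apRunF]
      by_cases hd : PySem.Chars.strIsdigit v = true
      · rw [if_pos hd]
        rw [IH rest _ (by omega)]
        have hA : apAF (pvMeas v off + 1) v off = v := by simp [apAF, hd]
        simp [itemOut, hA, List.append_assoc]
      · have hd' : PySem.Chars.strIsdigit v = false := by simpa using hd
        rw [if_neg (by simp [hd'])]
        rw [IH (pvChildren v off ++ rest) _ ?_]
        · rw [List.flatMap_append]
          simp [itemOut, apAF_canon v off hd', List.append_assoc]
        · have hb : bndOf (v, off) = 1 + ((pvChildren v off).map bndOf).sum :=
            pvBnd_canon v off hd'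
          rw [List.map_append, List.sum_append]
          omega

-- ===== VERDICT (by name: the statement is the Claim_ definition above) =====
theorem allPossibilities_spec : Claim_equal_allPossibilities := by
  intro value offset _ _
  unfold Spec_allPossibilities allPossibilities allPossibilities_alt
  by_cases hd : PySem.Chars.strIsdigit value.toList = true
  · have hA : apAF (pvMeas value.toList offset + 1) value.toList offset = value.toList := by
      simp [apAF, hd]
    simp [PySem.Str.strIsdigit_eq, hd, hA, String.ofList_toList]
  · have hd' : PySem.Chars.strIsdigit value.toList = false := by
      simpa using hd
    rw [if_neg (by simp [PySem.Str.strIsdigit_eq, hd'])]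
    have hb : ((pvChildren value.toList offset).map bndOf).sum
        ≤ pvBnd (pvMeas value.toList offset + 1) value.toList offset := by
      rw [pvBnd_canon _ _ hd']; omega
    rw [apRunF_eq _ _ _ hb, apAF_canon _ _ hd']
    simp
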